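-- pv_equiv track=rewrite | github.com/Naishiy/VA-11HALL-A | DiscMath/Лаб1.py | Gx
-- ===== SOURCE A (Python) =====
-- def Gx(Inc, xi):
--
--     indexes = [i for i, v in enumerate(Inc[xi]) if v == -1]
--
--     Gx = []
--
--     for a in range(len(indexes)):
--         for i in range(len(Inc)):
--             if Inc[i][indexes[a]] == 1:
--                 Gx.append(i+1)
--
--     return Gx
-- ===== SOURCE B (Python) =====
-- def Gx(Inc, xi):
--     # Build, in one pass over the matrix, the ordered list of heads (i+1) for each column j.
--     heads = {}
--     for i, row in enumerate(Inc):
--         for j, v in enumerate(row):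
--             if v == 1:
--                 heads[j] = heads.get(j, []) + [i + 1]
--     return [h for j, v in enumerate(Inc[xi]) if v == -1 for h in heads.get(j, [])]
-- ===== Notes on version B (the rewrite author's own statement) =====
-- stated objective: faster
-- what changed: A rescans the whole matrix once per -1 entry of row xi; B builds a column->heads index in one pass over the matrix and then just concatenates the precomputed lists for the -1 columns of row xi.
-- outside the precondition, e.g. on Gx([[-1, -1], [1]], 0): A raises IndexError, B returns [2]
import Mathlib
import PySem

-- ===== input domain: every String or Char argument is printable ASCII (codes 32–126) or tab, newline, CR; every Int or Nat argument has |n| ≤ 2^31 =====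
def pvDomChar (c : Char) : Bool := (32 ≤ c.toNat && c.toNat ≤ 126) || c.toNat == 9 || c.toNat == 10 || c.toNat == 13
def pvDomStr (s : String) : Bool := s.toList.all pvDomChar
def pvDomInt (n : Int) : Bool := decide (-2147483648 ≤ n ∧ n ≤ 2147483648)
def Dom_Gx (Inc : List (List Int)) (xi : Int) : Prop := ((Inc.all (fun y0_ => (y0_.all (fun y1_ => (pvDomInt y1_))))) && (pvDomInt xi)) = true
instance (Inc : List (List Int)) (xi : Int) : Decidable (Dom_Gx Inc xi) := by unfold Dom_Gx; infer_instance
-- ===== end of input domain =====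

-- B replaces A's per-(-1)-entry rescan of the whole matrix by a single pass that indexes
-- each column's heads, then looks the -1 columns of row xi up (objective: faster).

-- ===== PORT A =====
-- A: per -1 entry of row xi, rescan every row of the matrix.
-- Where Python raises (Inc[xi] out of range; Inc[i][indexes[a]] out of range) the port's
-- pyGet? is none: we return []/skip there; such inputs are excluded by Pre_Gx.
def Gx (Inc : List (List Int)) (xi : Int) : List Int :=
  match PySem.List.pyGet? Inc xi with
  | none => []  -- IndexError on Inc[xi]: outside Pre_Gx
  | some row =>
    let indexes : List Int :=
      ((PySem.List.enumerate row).filter (fun p => p.2 == -1)).map (fun p => p.1)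
    (PySem.List.pyRange 0 (indexes.length : Int) 1).foldl (fun g a =>
      (PySem.List.pyRange 0 (Inc.length : Int) 1).foldl (fun g i =>
        if PySem.List.pyGet? (PySem.List.pyGetD Inc i []) (PySem.List.pyGetD indexes a 0) == some 1
        then g ++ [i + 1] else g) g) []

-- ===== PORT B =====
-- B: one pass builds heads : column j -> ordered list of i+1 with Inc[i][j] == 1,
-- then the -1 columns of row xi are looked up.  heads[j] = heads.get(j, []) + [i+1]
-- is PySem.Dict.modify.  Inc[xi] raising (none) is outside Pre_Gx; we return [].
def Gx_alt (Inc : List (List Int)) (xi : Int) : List Int :=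
  let heads : PySem.Dict Int (List Int) :=
    (PySem.List.enumerate Inc).foldl (fun d p =>
      (PySem.List.enumerate p.2).foldl (fun d q =>
        if q.2 == 1 then d.modify q.1 [] (fun l => l ++ [p.1 + 1]) else d) d)
      PySem.Dict.empty
  match PySem.List.pyGet? Inc xi with
  | none => []  -- IndexError on Inc[xi]: outside Pre_Gx
  | some row =>
    ((PySem.List.enumerate row).filter (fun p => p.2 == -1)).flatMap
      (fun p => heads.getD p.1 [])

-- ===== PRECONDITION & SPEC =====
-- Pre_ excludes exactly the inputs where Python A raises: xi out of range for Inc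
-- (IndexError on Inc[xi]), and ragged matrices where some row is too short at a
-- column holding -1 in row xi (IndexError on Inc[i][indexes[a]]).
def Pre_Gx (Inc : List (List Int)) (xi : Int) : Prop :=
  (PySem.List.pyGet? Inc xi).isSome = true ∧
  ∀ p ∈ PySem.List.enumerate ((PySem.List.pyGet? Inc xi).getD []),
    p.2 = -1 → ∀ r ∈ Inc, p.1 < (r.length : Int)
instance (Inc : List (List Int)) (xi : Int) : Decidable (Pre_Gx Inc xi) := by
  unfold Pre_Gx; infer_instance

def pvWitness_Gx : List (List Int) × Int := ([[0, -1], [1, 1], [0, 1]], 0)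

def Spec_Gx (Inc : List (List Int)) (xi : Int) (out : List Int) : Prop := out = Gx_alt Inc xi
instance (Inc : List (List Int)) (xi : Int) (out : List Int) : Decidable (Spec_Gx Inc xi out) := by unfold Spec_Gx; infer_instance

-- ===== CLAIM (what is proved, stated in full; the proofs are below) =====
def Claim_equal_Gx : Prop := ∀ (Inc : List (List Int)) (xi : Int), Dom_Gx Inc xi → Pre_Gx Inc xi → Spec_Gx Inc xi (Gx Inc xi)

-- ===== LEMMAS AND PROOFS =====

-- the heads dictionary built by Gx_alt, named for the proofs
def bH (Inc : List (List Int)) : PySem.Dict Int (List Int) :=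
  (PySem.List.enumerate Inc).foldl (fun d p =>
    (PySem.List.enumerate p.2).foldl (fun d q =>
      if q.2 == 1 then d.modify q.1 [] (fun l => l ++ [p.1 + 1]) else d) d)
    PySem.Dict.empty

-- the (column, head) pairs the double loop inserts, flattened
def pairs (Inc : List (List Int)) : List (Int × Int) :=
  (PySem.List.enumerate Inc).flatMap (fun p =>
    ((PySem.List.enumerate p.2).filter (fun q => q.2 == 1)).map (fun q => (q.1, p.1 + 1)))

def hcond (j : Int) (p : Int × List Int) : Bool :=
  decide (0 ≤ j) && (PySem.List.pyGet? p.2 j == some 1)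

-- the heads list of column j: all i+1 with Inc[i][j] == 1, in row order
def Hlist (Inc : List (List Int)) (j : Int) : List Int :=
  ((PySem.List.enumerate Inc).filter (hcond j)).map (fun p => p.1 + 1)

lemma Gx_alt_eq (Inc : List (List Int)) (xi : Int) :
    Gx_alt Inc xi = match PySem.List.pyGet? Inc xi with
      | none => []
      | some row => ((PySem.List.enumerate row).filter (fun p => p.2 == -1)).flatMap
          (fun p => (bH Inc).getD p.1 []) := rfl

lemma flatMap_ite_singleton {α β : Type} (l : List α) (p : α → Bool) (f : α → β) :
    l.flatMap (fun x => if p x then [f x] else []) = (l.filter p).map f := by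
  induction l with
  | nil => simp
  | cons x xs ih => simp only [List.flatMap_cons, List.filter_cons, ih]; split <;> simp

-- among the enumerated entries of a row, the (column, value) pairs with value 1 at column j
lemma rowPick (row : List Int) (j : Int) : ∀ s : Int,
    (PySem.List.enumerate row s).filter (fun q => q.1 == j && q.2 == 1)
      = if s ≤ j ∧ PySem.List.pyGet? row (j - s) = some 1 then [(j, (1 : Int))] else [] := by
  induction row with
  | nil =>
    intro s
    simp [PySem.List.enumerate_nil, PySem.List.pyGet?]
  | cons x xs ih =>
    intro s
    rw [PySem.List.enumerate_cons, List.filter_cons, ih (s + 1)]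
    by_cases hj : j = s
    · subst hj
      have h0 : j - j = ((0 : Nat) : Int) := by omega
      rw [h0, PySem.List.pyGet?_natCast]
      by_cases hx : x = 1
      · subst hx; simp [show ¬ (j + 1 ≤ j) by omega]
      · simp [hx, show ¬ (j + 1 ≤ j) by omega]
    · rw [if_neg (by simp [show s ≠ j from fun h => hj h.symm])]
      by_cases hlt : s < j
      · have h2 : j - (s + 1) = (((j - s - 1).toNat : Int)) := by omega
        have h1 : j - s = (((j - s - 1).toNat : Int)) + 1 := by omega
        rw [h2, h1, PySem.List.pyGet?_cons_succ]
        have hiff : (s + 1 ≤ j) ↔ (s ≤ j) := by omega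
        simp only [hiff]
        have hidx : ((((j - s - 1).toNat : Int) + 1 - 1)).toNat = (j - s - 1).toNat := by omega
        rw [hidx]
      · have hns : ¬ (s ≤ j) := by omega
        have hns1 : ¬ (s + 1 ≤ j) := by omega
        simp [hns, hns1]

-- the double insert loop is the flattened pair loop
lemma bH_eq_pairs (Inc : List (List Int)) :
    bH Inc = (pairs Inc).foldl (fun d pr => d.modify pr.1 [] (fun l => l ++ [pr.2]))
      PySem.Dict.empty := by
  unfold bH pairs
  rw [List.foldl_flatMap]
  simp only [List.foldl_map, List.foldl_filter]

-- the heads dictionary looks up exactly the column list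
lemma bH_getD (Inc : List (List Int)) (j : Int) :
    (bH Inc).getD j [] = Hlist Inc j := by
  rw [bH_eq_pairs, PySem.Dict.getD_foldl_modify_append, PySem.Dict.getD_empty, List.nil_append]
  unfold pairs Hlist
  rw [List.filter_flatMap, List.map_flatMap,
    ← flatMap_ite_singleton (PySem.List.enumerate Inc) (hcond j) (fun p => p.1 + 1)]
  congr 1
  funext p
  rw [List.filter_map, List.map_map]
  have hcomp : ((fun pr : Int × Int => pr.1 == j) ∘ (fun q : Int × Int => (q.1, p.1 + 1)))
      = fun q : Int × Int => q.1 == j := rfl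
  rw [hcomp, List.filter_filter, rowPick p.2 j 0]
  by_cases hc : 0 ≤ j ∧ PySem.List.pyGet? p.2 j = some 1
  · rw [if_pos (by simpa using hc)]
    have : hcond j p = true := by simp [hcond, hc.1, hc.2]
    simp [this]
  · rw [if_neg (by simpa using hc)]
    have : hcond j p = false := by
      by_contra hne
      exact hc (by simpa [hcond] using eq_true_of_ne_false hne)
    simp [this]

-- the inner scan of Gx over all rows, as a filter over the enumerated matrix
lemma innerScan_eq (Inc : List (List Int)) (j : Int) (g : List Int) :
    (PySem.List.pyRange 0 (Inc.length : Int) 1).foldl (fun g i =>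
        if PySem.List.pyGet? (PySem.List.pyGetD Inc i []) j == some 1 then g ++ [i + 1] else g) g
      = g ++ ((PySem.List.enumerate Inc).filter
          (fun p => PySem.List.pyGet? p.2 j == some 1)).map (fun p => p.1 + 1) := by
  rw [← PySem.List.foldl_append_if (fun p : Int × List Int => PySem.List.pyGet? p.2 j == some 1)
    (fun p : Int × List Int => p.1 + 1)]
  rw [PySem.List.enumerate_eq_map_pyRange (xs := Inc) (d := ([] : List Int)), List.foldl_map]
  rfl

lemma mem_indexes_nonneg {row : List Int} {j : Int}
    (h : j ∈ ((PySem.List.enumerate row).filter (fun p => p.2 == -1)).map (fun p => p.1)) :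
    0 ≤ j := by
  rcases List.mem_map.1 h with ⟨p, hp, rfl⟩
  rcases (PySem.List.mem_enumerate_iff _ _ _).1 (List.mem_filter.1 hp).1 with ⟨k, hk, rfl⟩
  simp

-- ===== VERDICT (by name: the statement is the Claim_ definition above) =====
theorem Gx_spec : Claim_equal_Gx := by
  unfold Claim_equal_Gx
  intro Inc xi _ _
  unfold Spec_Gx
  rw [Gx_alt_eq]
  unfold Gx
  cases h : PySem.List.pyGet? Inc xi with
  | none => rfl
  | some row =>
    simp only []
    set indexes : List Int :=
      ((PySem.List.enumerate row).filter (fun p => p.2 == -1)).map (fun p => p.1) with hidx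
    rw [PySem.List.foldl_pyRange_zero_pyGetD'
      (f := fun g j => (PySem.List.pyRange 0 (Inc.length : Int) 1).foldl (fun g i =>
        if PySem.List.pyGet? (PySem.List.pyGetD Inc i []) j == some 1 then g ++ [i + 1] else g) g)
      (d := (0 : Int))]
    have hstep : ∀ (g : List Int) (j : Int), j ∈ indexes →
        (PySem.List.pyRange 0 (Inc.length : Int) 1).foldl (fun g i =>
          if PySem.List.pyGet? (PySem.List.pyGetD Inc i []) j == some 1 then g ++ [i + 1] else g) g
        = g ++ Hlist Inc j := by
      intro g j hj
      have h0j : 0 ≤ j := mem_indexes_nonneg (hidx ▸ hj)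
      rw [innerScan_eq]
      unfold Hlist
      rw [List.filter_congr (q := hcond j) (fun x _ => by unfold hcond; rw [decide_eq_true h0j, Bool.true_and])]
    rw [PySem.List.foldl_congr_mem indexes _ (fun g j => g ++ Hlist Inc j) [] hstep]
    rw [PySem.List.foldl_append_eq_flatMap, List.nil_append, hidx, List.flatMap_map]
    simp only [bH_getD]
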